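-- pv_equiv track=rewrite | github.com/jieminF1994/product_illustration_automation | extract_annuity_data.py | _candidate_page_indexes
-- ===== SOURCE A (Python) =====
-- from typing import Dict, List, Optional, Tuple
--
-- def _candidate_page_indexes(
--     pages: List[List[str]], preferred_page: Optional[int], required_text: str
-- ) -> List[int]:
--     indexes: List[int] = []
--     if preferred_page is not None and 0 <= preferred_page < len(pages):
--         indexes.append(preferred_page)
--
--     lowered_required = required_text.lower()
--     for idx, lines in enumerate(pages):
--         if idx in indexes:
--             continue
--         if not lowered_required or lowered_required in " ".join(lines).lower():
--             indexes.append(idx)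
--     return indexes
-- ===== SOURCE B (Python) =====
-- def _candidate_page_indexes(pages, preferred_page, required_text):
--     needle = required_text.lower()
--     pref = None
--     if preferred_page is not None and 0 <= preferred_page < len(pages):
--         pref = preferred_page
--     keep = {idx for idx, lines in enumerate(pages)
--             if not needle or needle in " ".join(lines).lower()}
--     if pref is not None:
--         keep.add(pref)
--     return sorted(keep, key=lambda i: (0 if i == pref else 1, i))
-- ===== Notes on version B (the rewrite author's own statement) =====
-- stated objective: alternative
-- what changed: B collects the matching page indexes (plus the valid preferred index) into a set and recovers the output order with one key-based sort (preferred-first, then ascending), replacing A's seed-then-skip ordered accumulator loop with an unordered set union followed by a sort.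
import Mathlib
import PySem

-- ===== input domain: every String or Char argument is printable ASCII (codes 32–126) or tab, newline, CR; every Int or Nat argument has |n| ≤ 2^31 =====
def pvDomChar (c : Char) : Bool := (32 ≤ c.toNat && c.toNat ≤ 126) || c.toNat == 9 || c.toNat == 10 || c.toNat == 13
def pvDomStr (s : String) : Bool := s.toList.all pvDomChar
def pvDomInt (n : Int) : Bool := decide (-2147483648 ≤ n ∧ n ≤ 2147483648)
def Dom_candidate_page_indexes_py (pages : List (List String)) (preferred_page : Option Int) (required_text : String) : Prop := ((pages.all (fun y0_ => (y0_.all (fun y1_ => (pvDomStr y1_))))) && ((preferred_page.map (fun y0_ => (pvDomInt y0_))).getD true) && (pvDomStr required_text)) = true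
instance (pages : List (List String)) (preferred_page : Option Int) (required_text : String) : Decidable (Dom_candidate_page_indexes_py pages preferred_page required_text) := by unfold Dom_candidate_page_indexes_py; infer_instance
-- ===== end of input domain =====

-- B rebuilds the result as a SET of matching indexes (plus the valid preferred index) and
-- recovers the output order with one key-based sort (preferred-first, then ascending),
-- instead of A's seed-then-skip accumulator loop; objective: alternative algorithm (set + sort).

-- ===== PORT A =====
def candidate_page_indexes_py (pages : List (List String)) (preferred_page : Option Int) (required_text : String) : List Int :=
  let indexes : List Int :=
    match preferred_page with
    | some p => if 0 ≤ p ∧ p < PySem.List.len pages then [p] else []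
    | none => []
  let lowered := PySem.Str.lower required_text
  (PySem.List.enumerate pages 0).foldl
    (fun acc pr =>
      if pr.1 ∈ acc then acc
      else if (lowered == "") || PySem.Str.isIn lowered (PySem.Str.lower (PySem.Str.join " " pr.2)) then acc ++ [pr.1]
      else acc)
    indexes

-- ===== PORT B =====
def candidate_page_indexes_py_alt (pages : List (List String)) (preferred_page : Option Int) (required_text : String) : List Int :=
  let needle := PySem.Str.lower required_text
  let pref : Option Int :=
    match preferred_page with
    | some p => if 0 ≤ p ∧ p < PySem.List.len pages then some p else none
    | none => none
  let keep : PySem.Set Int :=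
    PySem.Set.ofList
      (((PySem.List.enumerate pages 0).filter
          (fun pr => (needle == "") || PySem.Str.isIn needle (PySem.Str.lower (PySem.Str.join " " pr.2)))).map (·.1))
  let keep : PySem.Set Int :=
    match pref with
    | some p => PySem.Set.add keep p
    | none => keep
  -- sorted(keep, key=lambda i: (0 if i == pref else 1, i)); the key is injective on Int,
  -- so the result does not depend on the set's iteration order
  PySem.List.sorted2 keep
    (fun i => if (match pref with | some p => i == p | none => false) then (0 : Int) else 1)
    (fun i => i)

-- ===== PRECONDITION & SPEC =====
def Spec_candidate_page_indexes_py (pages : List (List String)) (preferred_page : Option Int) (required_text : String) (out : List Int) : Prop := out = candidate_page_indexes_py_alt pages preferred_page required_text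
instance (pages : List (List String)) (preferred_page : Option Int) (required_text : String) (out : List Int) : Decidable (Spec_candidate_page_indexes_py pages preferred_page required_text out) := by unfold Spec_candidate_page_indexes_py; infer_instance

-- ===== CLAIM (what is proved, stated in full; the proofs are below) =====
def Claim_equal_candidate_page_indexes_py : Prop := ∀ (pages : List (List String)) (preferred_page : Option Int) (required_text : String), Dom_candidate_page_indexes_py pages preferred_page required_text → Spec_candidate_page_indexes_py pages preferred_page required_text (candidate_page_indexes_py pages preferred_page required_text)

-- ===== LEMMAS AND PROOFS =====

-- A's loop when no index was seeded: the membership test never fires.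
theorem pv_loop_noseed (c : List String → Bool) :
    ∀ (pages : List (List String)) (s : Int) (acc : List Int),
      (∀ x ∈ acc, x < s) →
      (PySem.List.enumerate pages s).foldl
          (fun acc pr =>
            if pr.1 ∈ acc then acc
            else if c pr.2 then acc ++ [pr.1] else acc) acc
        = acc ++ ((PySem.List.enumerate pages s).filter (fun pr => c pr.2)).map (·.1) := by
  intro pages
  induction pages with
  | nil => intro s acc _; simp [PySem.List.enumerate_nil]
  | cons hd tl ih =>
      intro s acc hacc
      rw [PySem.List.enumerate_cons]
      have hmem : s ∉ acc := fun h => absurd (hacc s h) (by omega)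
      simp only [List.foldl_cons, List.filter_cons, if_neg hmem]
      by_cases hc : c hd = true
      · rw [if_pos hc, ih (s + 1) (acc ++ [s]) ?_, hc]
        · simp
        · intro x hx
          rcases List.mem_append.mp hx with h | h
          · exact lt_trans (hacc x h) (by omega)
          · simp at h; omega
      · rw [if_neg hc, ih (s + 1) acc (fun x hx => lt_trans (hacc x hx) (by omega))]
        simp [hc]

-- A's loop when the preferred index p was seeded: the membership test fires exactly at p.
theorem pv_loop_seed (c : List String → Bool) (p : Int) :
    ∀ (pages : List (List String)) (s : Int) (acc : List Int),
      p ∈ acc →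
      (∀ x ∈ acc, x < s ∨ x = p) →
      (PySem.List.enumerate pages s).foldl
          (fun acc pr =>
            if pr.1 ∈ acc then acc
            else if c pr.2 then acc ++ [pr.1] else acc) acc
        = acc ++ ((PySem.List.enumerate pages s).filter (fun pr => c pr.2 && pr.1 ≠ p)).map (·.1) := by
  intro pages
  induction pages with
  | nil => intro s acc _ _; simp [PySem.List.enumerate_nil]
  | cons hd tl ih =>
      intro s acc hp hacc
      rw [PySem.List.enumerate_cons]
      simp only [List.foldl_cons, List.filter_cons]
      by_cases hsp : s = p
      · have hmem : s ∈ acc := hsp ▸ hp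
        rw [if_pos hmem]
        have : (c hd && decide (s ≠ p)) = false := by simp [hsp]
        rw [this]
        simp only [Bool.false_eq_true, if_false]
        exact ih (s + 1) acc hp (fun x hx => by rcases hacc x hx with h | h <;> omega)
      · have hmem : s ∉ acc := by
          intro h; rcases hacc s h with h' | h' <;> [omega; exact hsp h']
        rw [if_neg hmem]
        by_cases hc : c hd = true
        · have : (c hd && decide (s ≠ p)) = true := by simp [hc, hsp]
          rw [if_pos hc, this, ih (s + 1) (acc ++ [s]) (List.mem_append_left _ hp) ?_]
          · simp
          · intro x hx
            rcases List.mem_append.mp hx with h | h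
            · rcases hacc x h with h' | h' <;> omega
            · simp at h; omega
        · have : (c hd && decide (s ≠ p)) = false := by simp [hc]
          rw [if_neg hc, this]
          simp only [Bool.false_eq_true, if_false]
          exact ih (s + 1) acc hp (fun x hx => by rcases hacc x hx with h | h <;> omega)

-- B's sorted2 with Int keys IS sorted with the lexicographic pair key.
theorem pv_sorted2_eq_sorted_lex (xs : List Int) (k1 k2 : Int → Int) :
    PySem.List.sorted2 xs k1 k2 false
      = PySem.List.sorted xs (fun i => toLex (k1 i, k2 i)) false := by
  rw [PySem.List.sorted_eq_foldl_insertBy]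
  show List.foldl _ [] xs = _
  congr 1
  funext acc x
  congr 1
  funext a b
  by_cases h1 : k1 a < k1 b <;> by_cases h2 : k1 b < k1 a <;> by_cases h3 : k2 a < k2 b <;>
    simp [h1, h2, h3, Prod.Lex.lt_iff] <;> omega

-- The matching-index list is strictly increasing.
theorem pv_matches_pairwise (c : List String → Bool) (pages : List (List String)) (s : Int) :
    (((PySem.List.enumerate pages s).filter (fun pr => c pr.2)).map (·.1)).Pairwise (· < ·) := by
  exact List.Pairwise.map _ (fun a b h => h)
    (List.Pairwise.filter _ (PySem.List.pairwise_lt_enumerate pages s))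

theorem pv_matches_nodup (c : List String → Bool) (pages : List (List String)) (s : Int) :
    (((PySem.List.enumerate pages s).filter (fun pr => c pr.2)).map (·.1)).Nodup :=
  (pv_matches_pairwise c pages s).imp (fun h => ne_of_lt h)

-- sorted2 of the kept set with the preferred-first key, seeded case.
theorem pv_sorted_seed (c : List String → Bool) (pages : List (List String)) (p : Int) :
    PySem.List.sorted2
        (PySem.Set.add (PySem.Set.ofList (((PySem.List.enumerate pages 0).filter (fun pr => c pr.2)).map (·.1))) p)
        (fun i => if i == p then (0 : Int) else 1) (fun i => i) false
      = p :: (((PySem.List.enumerate pages 0).filter (fun pr => c pr.2)).map (·.1)).filter (fun i => i ≠ p) := by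
  set ms := (((PySem.List.enumerate pages 0).filter (fun pr => c pr.2)).map (·.1)) with hms
  have hnd : ms.Nodup := pv_matches_nodup c pages 0
  have hpw : ms.Pairwise (· < ·) := pv_matches_pairwise c pages 0
  rw [PySem.Set.ofList_eq_self_of_nodup ms hnd, pv_sorted2_eq_sorted_lex]
  apply PySem.List.sorted_eq_of_perm_of_pairwise_lt
  · -- permutation
    by_cases hp : p ∈ ms
    · rw [PySem.Set.add_of_mem hp]
      have h1 : (p :: ms.filter (fun i => i ≠ p)) = p :: ms.erase p := by
        rw [List.Nodup.erase_eq_filter hnd p]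
        exact congrArg _ (List.filter_congr fun a _ => by by_cases h : a = p <;> simp [h, bne])
      rw [h1]
      exact (List.perm_cons_erase hp).symm
    · rw [PySem.Set.add_of_not_mem hp]
      have h1 : ms.filter (fun i => i ≠ p) = ms := by
        refine List.filter_eq_self.mpr (fun a ha => ?_)
        simp; rintro rfl; exact hp ha
      rw [h1]
      exact (List.perm_append_singleton p ms).symm
  · -- strictly increasing under the lex key
    refine List.pairwise_cons.mpr ⟨?_, ?_⟩
    · intro b hb
      have hbp : b ≠ p := by
        have := List.of_mem_filter hb; simpa using this
      simp [Prod.Lex.lt_iff, hbp]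
    · refine List.Pairwise.imp_of_mem ?_ (List.Pairwise.filter _ hpw)
      intro a b hamem hbmem hab
      have hap : a ≠ p := by have := List.of_mem_filter hamem; simpa using this
      have hbp2 : b ≠ p := by have := List.of_mem_filter hbmem; simpa using this
      simp [hap, hbp2, hab, Prod.Lex.lt_iff]

-- sorted2 of the kept set, no valid preferred index.
theorem pv_sorted_noseed (c : List String → Bool) (pages : List (List String)) :
    PySem.List.sorted2
        (PySem.Set.ofList (((PySem.List.enumerate pages 0).filter (fun pr => c pr.2)).map (·.1)))
        (fun _ => (1 : Int)) (fun i => i) false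
      = ((PySem.List.enumerate pages 0).filter (fun pr => c pr.2)).map (·.1) := by
  set ms := (((PySem.List.enumerate pages 0).filter (fun pr => c pr.2)).map (·.1)) with hms
  have hnd : ms.Nodup := pv_matches_nodup c pages 0
  have hpw : ms.Pairwise (· < ·) := pv_matches_pairwise c pages 0
  rw [PySem.Set.ofList_eq_self_of_nodup ms hnd, pv_sorted2_eq_sorted_lex]
  apply PySem.List.sorted_eq_of_perm_of_pairwise_lt
  · exact List.Perm.refl _
  · refine hpw.imp ?_
    intro a b hab
    simp [Prod.Lex.lt_iff, hab]

-- ===== VERDICT (by name: the statement is the Claim_ definition above) =====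
theorem candidate_page_indexes_py_spec : Claim_equal_candidate_page_indexes_py := by
  intro pages preferred_page required_text _
  unfold Spec_candidate_page_indexes_py candidate_page_indexes_py candidate_page_indexes_py_alt
  set c : List String → Bool := fun lines =>
    (PySem.Str.lower required_text == "") || PySem.Str.isIn (PySem.Str.lower required_text) (PySem.Str.lower (PySem.Str.join " " lines)) with hc
  cases preferred_page with
  | none =>
      dsimp only
      rw [pv_loop_noseed c pages 0 [] (by simp)]
      simp only [List.nil_append, Bool.false_eq_true, if_false]
      rw [pv_sorted_noseed c pages]
  | some p =>
      by_cases hp : 0 ≤ p ∧ p < PySem.List.len pages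
      · simp only [if_pos hp]
        rw [pv_loop_seed c p pages 0 [p] (by simp) (by simp)]
        have hA : ([p] : List Int) ++ ((PySem.List.enumerate pages 0).filter (fun pr => c pr.2 && pr.1 ≠ p)).map (·.1)
            = p :: (((PySem.List.enumerate pages 0).filter (fun pr => c pr.2)).map (·.1)).filter (fun i => i ≠ p) := by
          rw [List.singleton_append]
          congr 1
          rw [List.filter_map, List.filter_filter]
          refine congrArg _ (List.filter_congr ?_)
          intro pr _
          by_cases h : pr.1 = p <;> simp [h]
        rw [hA, ← pv_sorted_seed c pages p]
      · simp only [if_neg hp]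
        rw [pv_loop_noseed c pages 0 [] (by simp)]
        simp only [List.nil_append, Bool.false_eq_true, if_false]
        rw [pv_sorted_noseed c pages]
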